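-- pv_equiv track=rewrite | github.com/Sravan-k-177/amfoss-tasks | task-04/grid_lock.py | number_of_spaces
-- ===== SOURCE A (Python) =====
-- def word_length_calc(x):
--     x.strip()
--     length = 0
--     for i in x:
--         length += 1
--     return length
--
-- def string_reversal(x):
--     reversed_string = ''
--     for i in range(word_length_calc(x)-1,-1,-1):
--         reversed_string += x[i]
--     return reversed_string
--
-- def number_of_spaces(x):
--     spaces = 0
--     x = string_reversal(x)
--     alphabets = "ABCDEFGHIJKLMNOPQRSTUVWXYZ-"
--     encountered_spaces = True
--     for i in x:
--         if i in alphabets: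
--             spaces += 1
--             encountered_spaces = False
--         elif i == "+" and not encountered_spaces:
--             break
--         else:
--             continue
--     return spaces
-- ===== SOURCE B (Python) =====
-- def number_of_spaces(x):
--     alpha = set("ABCDEFGHIJKLMNOPQRSTUVWXYZ-")
--     best = 0   # letter-count of the last completed plus-delimited segment that contained a letter
--     cur = 0    # letter-count of the current segment
--     for ch in x:
--         if ch == '+':
--             if cur != 0:
--                 best = cur
--             cur = 0
--         elif ch in alpha:
--             cur += 1
--     return cur if cur != 0 else best
-- ===== Notes on version B (the rewrite author's own statement) =====
-- stated objective: faster
-- what changed: Replaced A's index-loop string reversal helper (quadratic repeated concatenation) plus flag-driven backward scan with a single forward fold over the string that tracks the letter-count of the current plus-delimited segment and the last completed nonzero count.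
import Mathlib
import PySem

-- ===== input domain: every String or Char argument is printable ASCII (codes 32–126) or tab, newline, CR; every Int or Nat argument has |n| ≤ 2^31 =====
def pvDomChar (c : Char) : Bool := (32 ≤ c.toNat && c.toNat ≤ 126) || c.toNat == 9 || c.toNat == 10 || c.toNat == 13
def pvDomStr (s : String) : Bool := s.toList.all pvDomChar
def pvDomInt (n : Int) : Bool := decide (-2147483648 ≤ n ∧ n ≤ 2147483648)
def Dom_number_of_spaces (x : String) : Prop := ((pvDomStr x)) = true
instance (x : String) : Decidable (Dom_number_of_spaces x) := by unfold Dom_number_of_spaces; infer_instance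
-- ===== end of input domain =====

-- B replaces A's quadratic string reversal + flag-driven backward scan by one forward fold
-- keeping the current and last nonzero segment letter-counts (objective: faster, one pass).


-- ===== PORT A =====
def word_length_calc (x : String) : Int :=
  -- x.strip() discards its result in A, so it has no effect
  x.toList.foldl (fun length _ => length + 1) 0

-- reversed_string += x[i]; the loop index is always in range, so the none (IndexError) arm
-- of pyGet? is unreachable; we append nothing there
def string_reversal (x : String) : String :=
  String.ofList ((PySem.List.pyRange (word_length_calc x - 1) (-1) (-1)).foldl
    (fun acc i => acc ++ ((PySem.Str.pyGet? x i).elim [] (fun c => [c]))) [])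

def nosAlphabets : String := "ABCDEFGHIJKLMNOPQRSTUVWXYZ-"

def nosLoopA : List Char → Int → Bool → Int
  | [], spaces, _ => spaces
  | i :: rest, spaces, encountered_spaces =>
    if PySem.Chars.isIn [i] nosAlphabets.toList then nosLoopA rest (spaces + 1) false
    else if i = '+' ∧ encountered_spaces = false then spaces
    else nosLoopA rest spaces encountered_spaces

def number_of_spaces (x : String) : Int :=
  nosLoopA (string_reversal x).toList 0 true

-- ===== PORT B =====
def nosAlphaSet : PySem.Set Char := PySem.Set.ofList "ABCDEFGHIJKLMNOPQRSTUVWXYZ-".toList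

def nosStep (s : Int × Int) (ch : Char) : Int × Int :=
  if ch = '+' then (if s.2 ≠ 0 then s.2 else s.1, 0)
  else if PySem.Set.contains nosAlphaSet ch then (s.1, s.2 + 1)
  else s

def number_of_spaces_alt (x : String) : Int :=
  let s := x.toList.foldl nosStep (0, 0)
  if s.2 ≠ 0 then s.2 else s.1

-- ===== PRECONDITION & SPEC =====
def Spec_number_of_spaces (x : String) (out : Int) : Prop := out = number_of_spaces_alt x
instance (x : String) (out : Int) : Decidable (Spec_number_of_spaces x out) := by unfold Spec_number_of_spaces; infer_instance

-- ===== CLAIM (what is proved, stated in full; the proofs are below) =====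
def Claim_equal_number_of_spaces : Prop := ∀ (x : String), Dom_number_of_spaces x → Spec_number_of_spaces x (number_of_spaces x)

-- ===== LEMMAS AND PROOFS =====

-- letter-count of the leading segment (up to the first '+')
def nosCntTW (l : List Char) : Int :=
  ((l.takeWhile (fun c => c ≠ '+')).countP (fun c => decide (c ∈ nosAlphabets.toList)) : Int)

-- value of A's backward scan with encountered_spaces still true
def nosF : List Char → Int
  | [] => 0
  | c :: t => if c ∈ nosAlphabets.toList then 1 + nosCntTW t else nosF t

theorem nos_isIn_singleton (c : Char) (s : List Char) :
    PySem.Chars.isIn [c] s = true ↔ c ∈ s := by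
  rw [PySem.Chars.isIn_iff_infix]
  constructor
  · intro h; exact h.mem (List.mem_singleton_self c)
  · intro h
    obtain ⟨pre, suf, rfl⟩ := List.append_of_mem h
    exact ⟨pre, suf, by simp⟩

theorem nos_plus_not_alpha : '+' ∉ nosAlphabets.toList := by decide

theorem nosLoopA_false (l : List Char) (spaces : Int) :
    nosLoopA l spaces false = spaces + nosCntTW l := by
  induction l generalizing spaces with
  | nil => simp [nosLoopA, nosCntTW]
  | cons c t ih =>
    by_cases hc : c ∈ nosAlphabets.toList
    · have hne : c ≠ '+' := fun h => nos_plus_not_alpha (h ▸ hc)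
      simp [nosLoopA, (nos_isIn_singleton c _).mpr hc, nosCntTW, hne,
        hc, ih]
      ring
    · have hIn : PySem.Chars.isIn [c] nosAlphabets.toList = false := by
        rw [Bool.eq_false_iff, Ne, nos_isIn_singleton]; exact hc
      by_cases hp : c = '+'
      · subst hp; simp [nosLoopA, hIn, nosCntTW]
      · simp [nosLoopA, hIn, hp, ih, nosCntTW, hc]

theorem nosLoopA_true (l : List Char) (spaces : Int) :
    nosLoopA l spaces true = spaces + nosF l := by
  induction l generalizing spaces with
  | nil => simp [nosLoopA, nosF]
  | cons c t ih =>
    by_cases hc : c ∈ nosAlphabets.toList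
    · simp [nosLoopA, (nos_isIn_singleton c _).mpr hc, nosF, hc, nosLoopA_false]
      ring
    · have hIn : PySem.Chars.isIn [c] nosAlphabets.toList = false := by
        rw [Bool.eq_false_iff, Ne, nos_isIn_singleton]; exact hc
      simp [nosLoopA, hIn, nosF, hc, ih]

theorem nos_foldl_len (l : List Char) :
    l.foldl (fun (length : Int) _ => length + 1) 0 = (l.length : Int) := by
  rw [PySem.List.foldl_add (g := fun _ => (1 : Int))]
  simp

theorem nos_rev_core (cs : List Char) :
    (PySem.List.pyRange ((cs.length : Int) - 1) (-1) (-1)).flatMap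
      (fun i => (PySem.List.pyGet? cs i).elim [] (fun c => [c])) = cs.reverse := by
  induction cs using List.reverseRecOn with
  | nil => rw [PySem.List.pyRange_neg_one_eq_nil (by simp)]; simp
  | append_singleton t c ih =>
    have hlen : ((t ++ [c]).length : Int) - 1 = (t.length : Int) := by
      simp
    rw [hlen, PySem.List.pyRange_neg_one_cons (by omega), List.flatMap_cons]
    have hget : PySem.List.pyGet? (t ++ [c]) (t.length : Int) = some c := by
      rw [PySem.List.pyGet?_natCast]
      exact List.getElem?_concat_length
    have hcongr : (PySem.List.pyRange ((t.length : Int) - 1) (-1) (-1)).flatMap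
        (fun i => (PySem.List.pyGet? (t ++ [c]) i).elim [] (fun c => [c]))
        = (PySem.List.pyRange ((t.length : Int) - 1) (-1) (-1)).flatMap
        (fun i => (PySem.List.pyGet? t i).elim [] (fun c => [c])) := by
      apply List.flatMap_congr
      intro i hi
      rw [PySem.List.mem_pyRange_neg_one] at hi
      have h0 : (0 : Int) ≤ i := by omega
      have hidx : i.toNat < t.length := by omega
      rw [PySem.List.pyGet?_of_nonneg _ h0, PySem.List.pyGet?_of_nonneg _ h0,
        List.getElem?_append_left hidx]
    rw [hget, hcongr, ih]
    simp

theorem string_reversal_toList (x : String) :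
    (string_reversal x).toList = x.toList.reverse := by
  unfold string_reversal word_length_calc
  rw [PySem.List.foldl_append_eq_flatMap, nos_foldl_len, List.nil_append, String.toList_ofList]
  have : ∀ i : Int, (PySem.Str.pyGet? x i).elim ([] : List Char) (fun c => [c])
      = (PySem.List.pyGet? x.toList i).elim [] (fun c => [c]) := by
    intro i; simp [PySem.Str.pyGet?]
  simp only [this]
  exact nos_rev_core x.toList

-- B's fold invariant: second component = current-segment count, result-so-far = nosF of the reverse
theorem nosFold_invariant (ds : List Char) :
    (ds.foldl nosStep (0, 0)).2 = nosCntTW ds.reverse ∧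
    (if (ds.foldl nosStep (0, 0)).2 ≠ 0 then (ds.foldl nosStep (0, 0)).2
     else (ds.foldl nosStep (0, 0)).1) = nosF ds.reverse := by
  induction ds using List.reverseRecOn with
  | nil => simp [nosCntTW, nosF]
  | append_singleton es c ih =>
    obtain ⟨ih1, ih2⟩ := ih
    rw [List.foldl_append, List.foldl_cons, List.foldl_nil, List.reverse_append]
    simp only [List.reverse_cons, List.reverse_nil, List.nil_append, List.cons_append]
    by_cases hp : c = '+'
    · subst hp
      rw [show nosStep (es.foldl nosStep (0, 0)) '+'
            = (if (es.foldl nosStep (0, 0)).2 ≠ 0 then (es.foldl nosStep (0, 0)).2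
               else (es.foldl nosStep (0, 0)).1, 0) from by rw [nosStep]; simp]
      constructor
      · simp [nosCntTW]
      · rw [show nosF ('+' :: es.reverse) = nosF es.reverse from by
          rw [nosF, if_neg (by decide)]]
        simpa using ih2
    · by_cases hc : c ∈ nosAlphabets.toList
      · have hset : PySem.Set.contains nosAlphaSet c = true := by
          rw [PySem.Set.contains_iff]
          rw [show nosAlphaSet = nosAlphabets.toList from by decide]
          exact hc
        rw [show nosStep (es.foldl nosStep (0, 0)) c
              = ((es.foldl nosStep (0, 0)).1, (es.foldl nosStep (0, 0)).2 + 1) from by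
            rw [nosStep, if_neg hp, hset]; simp]
        have hcnt : nosCntTW (c :: es.reverse) = nosCntTW es.reverse + 1 := by
          rw [nosCntTW, nosCntTW, List.takeWhile_cons, if_pos (by simpa using hp)]
          rw [List.countP_cons, if_pos (by simpa using hc)]
          push_cast; ring
        refine ⟨by rw [hcnt, ih1], ?_⟩
        rw [show nosF (c :: es.reverse) = 1 + nosCntTW es.reverse from by
          rw [nosF, if_pos hc]]
        rw [if_pos (by rw [ih1]; unfold nosCntTW; omega), ih1]
        ring
      · have hset : PySem.Set.contains nosAlphaSet c = false := by
          rw [Bool.eq_false_iff, Ne, PySem.Set.contains_iff]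
          rw [show nosAlphaSet = nosAlphabets.toList from by decide]
          exact hc
        rw [show nosStep (es.foldl nosStep (0, 0)) c = es.foldl nosStep (0, 0) from by
          rw [nosStep, if_neg hp, hset]; simp]
        have hcnt : nosCntTW (c :: es.reverse) = nosCntTW es.reverse := by
          rw [nosCntTW, nosCntTW, List.takeWhile_cons, if_pos (by simpa using hp)]
          rw [List.countP_cons, if_neg (by simpa using hc)]
          simp
        have hF : nosF (c :: es.reverse) = nosF es.reverse := by
          rw [nosF, if_neg hc]
        rw [hcnt, hF]
        exact ⟨ih1, ih2⟩

theorem number_of_spaces_eq (x : String) : number_of_spaces x = number_of_spaces_alt x := by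
  unfold number_of_spaces number_of_spaces_alt
  rw [string_reversal_toList, nosLoopA_true, zero_add]
  exact ((nosFold_invariant x.toList).2).symm

-- ===== VERDICT (by name: the statement is the Claim_ definition above) =====
theorem number_of_spaces_spec : Claim_equal_number_of_spaces := by
  intro x _
  unfold Spec_number_of_spaces
  exact number_of_spaces_eq x
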